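-- pv_equiv track=rewrite | github.com/modcatz/netology | tests_exercise/dataset_tests/minmax_courses/minmax.py | minmax_function
-- ===== SOURCE A (Python) =====
-- def minmax_function(courses,mentors,durations):
--     # В этот список будут добавляться словари-курсы
--     courses_list = []
--     # Допишите код, который генерирует словарь-курс с тремя ключами: "title", "mentors", "duration"
--     for name, teacher, time in zip(courses,mentors,durations):
--         course_dict = {"title": name, "mentors": teacher, "duration": time}
--         courses_list.append(course_dict)
--     # Найдите самое маленькое и самое большое значение длительности курса
--     # Подсказка: используйте функции min и max для списка durations
--     minx = min(durations)
--     maxx = max(durations)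
--     # Как видите, в duration встречаются одинаковые длительности курса. Допишите код, который это учитывает
--     # Подсказка 1: найдите индексы, по которым в списке durations встречается самое маленькое и самое большое значение
--     # Подсказка 2: не забудьте, что индекс можно удобно получить функцией enumerate
--     maxes = []
--     minis = []
--     for id, time in enumerate(durations):
--         if time == maxx:
--             maxes.append(id)
--         elif time == minx:
--             minis.append(id)
--
--     # # Соберите все названия самых коротких и самых длинных курсов
--     # # Так как курсов с одной длительностью может быть больше одного,
--     # # создайте список названий самых коротких (courses_min) и самых длинных (courses_max) курсов
--     courses_min = []
--     courses_max = []
--     for id in minis: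
--         courses_min.append(courses_list[id]["title"]) # Допишите код, который берёт по id нужный курс из courses_list и получает название курса из ключа "title"
--     for id in maxes:
--         courses_max.append(courses_list[id]["title"]) # По аналогии допишите такой же код для курсов максимальной длительности
--
--     # # Допишите конструкцию вывода результата. Можете использовать string.join()
--     return (f'Самый короткий курс(ы): {", ".join(courses_min)} - {minx} месяца(ев)\n'
--     f'Самый длинный курс(ы): {", ".join(courses_max)} - {maxx} месяца(ев)')
-- ===== SOURCE B (Python) =====
-- def minmax_function(courses, mentors, durations):
--     minx = min(durations)
--     maxx = max(durations)
--     courses_min = []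
--     courses_max = []
--     for name, time in zip(courses, durations):
--         if time == maxx:
--             courses_max.append(name)
--         elif time == minx:
--             courses_min.append(name)
--     return (f'Самый короткий курс(ы): {", ".join(courses_min)} - {minx} месяца(ев)\n'
--     f'Самый длинный курс(ы): {", ".join(courses_max)} - {maxx} месяца(ев)')
-- ===== Notes on version B (the rewrite author's own statement) =====
-- stated objective: simpler
-- what changed: B drops A's list-of-dicts construction and its index pipeline (enumerate to index lists, then index-to-title lookups) and instead selects the shortest/longest course names in one direct pass over zip(courses, durations), keeping A's min/max calls and the exact if/elif tie rule (one pass, no intermediate dict/index lists — a constant-factor saving); Pre_ excludes only the inputs where A raises (empty durations, or a min/max-duration index beyond len(courses) or len(mentors)).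
import Mathlib
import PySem

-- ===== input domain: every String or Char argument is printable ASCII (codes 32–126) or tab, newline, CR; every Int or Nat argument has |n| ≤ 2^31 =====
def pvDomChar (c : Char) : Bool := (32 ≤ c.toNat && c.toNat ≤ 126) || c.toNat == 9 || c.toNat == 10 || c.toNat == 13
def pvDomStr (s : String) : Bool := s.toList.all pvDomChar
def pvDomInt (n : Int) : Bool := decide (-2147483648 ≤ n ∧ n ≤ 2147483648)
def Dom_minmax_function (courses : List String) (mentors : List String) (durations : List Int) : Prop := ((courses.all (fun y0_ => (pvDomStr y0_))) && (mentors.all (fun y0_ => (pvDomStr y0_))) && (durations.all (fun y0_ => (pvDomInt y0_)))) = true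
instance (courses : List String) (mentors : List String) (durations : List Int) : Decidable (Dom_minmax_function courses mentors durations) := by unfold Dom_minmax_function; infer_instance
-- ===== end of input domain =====

-- B replaces A's dict-list construction and index pipeline (enumerate → index lists → title lookups)
-- with one direct selection pass over zip(courses, durations); same output, simpler decomposition.


-- ===== PORT A =====
-- zip(courses, mentors, durations) building the course "dicts"; each dict has fixed keys, ported as a triple (title, mentors, duration)
def pvZip3 : List String → List String → List Int → List (String × String × Int)
  | a :: as, b :: bs, t :: ts => (a, b, t) :: pvZip3 as bs ts
  | _, _, _ => []

-- the enumerate loop collecting (maxes, minis): same if/elif order as A; builds the same index lists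
def pvCollect (maxx minx : Int) (i : Int) : List Int → List Int × List Int
  | [] => ([], [])
  | t :: ts =>
    let r := pvCollect maxx minx (i + 1) ts
    if t = maxx then (i :: r.1, r.2)
    else if t = minx then (r.1, i :: r.2)
    else r

-- courses_list[id]["title"]; outside Pre_ Python raises IndexError (pyGet? = none), the "" default is never claimed
def pvTitle (L : List (String × String × Int)) (id : Int) : String :=
  ((PySem.List.pyGet? L id).map (fun c => c.1)).getD ""

def minmax_function (courses : List String) (mentors : List String) (durations : List Int) : String :=
  let courses_list := pvZip3 courses mentors durations
  -- min/max raise ValueError on []: excluded by Pre_, getD 0 never claimed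
  let minx := (PySem.List.min? durations (fun x => x)).getD 0
  let maxx := (PySem.List.max? durations (fun x => x)).getD 0
  let md := pvCollect maxx minx 0 durations
  let courses_min := md.2.map (pvTitle courses_list)
  let courses_max := md.1.map (pvTitle courses_list)
  "Самый короткий курс(ы): " ++ PySem.Str.join ", " courses_min ++ " - " ++ PySem.Int.toStr minx ++
    " месяца(ев)\nСамый длинный курс(ы): " ++ PySem.Str.join ", " courses_max ++ " - " ++ PySem.Int.toStr maxx ++ " месяца(ев)"

-- ===== PORT B =====
-- the single selection pass of Source B over zip(courses, durations), same if/elif order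
def pvSelect (minx maxx : Int) : List (String × Int) → List String × List String
  | [] => ([], [])
  | (n, t) :: ps =>
    let r := pvSelect minx maxx ps
    if t = maxx then (r.1, n :: r.2)
    else if t = minx then (n :: r.1, r.2)
    else r

def minmax_function_alt (courses : List String) (mentors : List String) (durations : List Int) : String :=
  let minx := (PySem.List.min? durations (fun x => x)).getD 0
  let maxx := (PySem.List.max? durations (fun x => x)).getD 0
  let r := pvSelect minx maxx (courses.zip durations)
  "Самый короткий курс(ы): " ++ PySem.Str.join ", " r.1 ++ " - " ++ PySem.Int.toStr minx ++
    " месяца(ев)\nСамый длинный курс(ы): " ++ PySem.Str.join ", " r.2 ++ " - " ++ PySem.Int.toStr maxx ++ " месяца(ев)"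

-- ===== PRECONDITION & SPEC =====
-- Pre_ excludes exactly the inputs where A raises: durations empty (ValueError in min/max), or some index
-- carrying a minimal or maximal duration is ≥ len(courses) or ≥ len(mentors) (IndexError on courses_list).
def Pre_minmax_function (courses : List String) (mentors : List String) (durations : List Int) : Prop :=
  durations ≠ [] ∧
  ∀ i : Nat, i < durations.length →
    ((∀ j : Nat, j < durations.length → durations.getD j 0 ≤ durations.getD i 0) ∨
     (∀ j : Nat, j < durations.length → durations.getD i 0 ≤ durations.getD j 0)) →
    i < courses.length ∧ i < mentors.length

instance (courses : List String) (mentors : List String) (durations : List Int) : Decidable (Pre_minmax_function courses mentors durations) := by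
  unfold Pre_minmax_function; infer_instance

def pvWitness_minmax_function : List String × List String × List Int := (["a", "b"], ["x", "y"], [1, 2])

def Spec_minmax_function (courses : List String) (mentors : List String) (durations : List Int) (out : String) : Prop := out = minmax_function_alt courses mentors durations
instance (courses : List String) (mentors : List String) (durations : List Int) (out : String) : Decidable (Spec_minmax_function courses mentors durations out) := by unfold Spec_minmax_function; infer_instance

-- ===== CLAIM (what is proved, stated in full; the proofs are below) =====
def Claim_equal_minmax_function : Prop := ∀ (courses : List String) (mentors : List String) (durations : List Int), Dom_minmax_function courses mentors durations → Pre_minmax_function courses mentors durations → Spec_minmax_function courses mentors durations (minmax_function courses mentors durations)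

-- ===== LEMMAS AND PROOFS =====

-- shifting the enumerate counter shifts every collected index by 1
theorem pvCollect_shift (maxx minx : Int) : ∀ (d : List Int) (i : Int),
    pvCollect maxx minx (i + 1) d =
      ((pvCollect maxx minx i d).1.map (· + 1), (pvCollect maxx minx i d).2.map (· + 1)) := by
  intro d
  induction d with
  | nil => intro i; simp [pvCollect]
  | cons t ts ih =>
    intro i
    simp only [pvCollect, ih (i + 1), ih i]
    split_ifs <;> simp

-- every index in the maxes list names a maximal duration (relative to maxx), counted from i
theorem pvCollect_mem1 (maxx minx : Int) : ∀ (d : List Int) (i : Int) (x : Int),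
    x ∈ (pvCollect maxx minx i d).1 → ∃ k : Nat, k < d.length ∧ x = i + k ∧ d.getD k 0 = maxx := by
  intro d
  induction d with
  | nil => intro i x hx; simp [pvCollect] at hx
  | cons t ts ih =>
    intro i x hx
    simp only [pvCollect] at hx
    split_ifs at hx with h1 h2
    · rcases List.mem_cons.mp hx with h | h
      · exact ⟨0, by simp, by omega, by simpa using h1⟩
      · obtain ⟨k, hk, hx', hd⟩ := ih (i + 1) x h
        exact ⟨k + 1, by simpa using hk, by omega, by simpa using hd⟩
    all_goals
      obtain ⟨k, hk, hx', hd⟩ := ih (i + 1) x hx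
      exact ⟨k + 1, by simpa using hk, by omega, by simpa using hd⟩

-- every index in the minis list names a minimal (and non-maximal) duration, counted from i
theorem pvCollect_mem2 (maxx minx : Int) : ∀ (d : List Int) (i : Int) (x : Int),
    x ∈ (pvCollect maxx minx i d).2 → ∃ k : Nat, k < d.length ∧ x = i + k ∧ d.getD k 0 = minx := by
  intro d
  induction d with
  | nil => intro i x hx; simp [pvCollect] at hx
  | cons t ts ih =>
    intro i x hx
    simp only [pvCollect] at hx
    split_ifs at hx with h1 h2
    · obtain ⟨k, hk, hx', hd⟩ := ih (i + 1) x hx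
      exact ⟨k + 1, by simpa using hk, by omega, by simpa using hd⟩
    · rcases List.mem_cons.mp hx with h | h
      · exact ⟨0, by simp, by omega, by simpa using h2⟩
      · obtain ⟨k, hk, hx', hd⟩ := ih (i + 1) x h
        exact ⟨k + 1, by simpa using hk, by omega, by simpa using hd⟩
    · obtain ⟨k, hk, hx', hd⟩ := ih (i + 1) x hx
      exact ⟨k + 1, by simpa using hk, by omega, by simpa using hd⟩

-- shifting a nonnegative index past one cons
theorem pvTitle_cons (p : String × String × Int) (L : List (String × String × Int)) (x : Int) (hx : 0 ≤ x) :
    pvTitle (p :: L) (x + 1) = pvTitle L x := by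
  obtain ⟨n, rfl⟩ : ∃ n : Nat, x = (n : Int) := ⟨x.toNat, (Int.toNat_of_nonneg hx).symm⟩
  simp [pvTitle, PySem.List.pyGet?_cons_succ]

-- main correspondence: A's collect-then-lookup pipeline equals B's single selection pass,
-- given that every index holding maxx or minx is inside both courses and mentors
theorem pv_main (maxx minx : Int) : ∀ (d : List Int) (c m : List String),
    (∀ k : Nat, k < d.length → (d.getD k 0 = maxx ∨ d.getD k 0 = minx) → k < c.length ∧ k < m.length) →
    (pvCollect maxx minx 0 d).1.map (pvTitle (pvZip3 c m d)) = (pvSelect minx maxx (c.zip d)).2 ∧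
    (pvCollect maxx minx 0 d).2.map (pvTitle (pvZip3 c m d)) = (pvSelect minx maxx (c.zip d)).1 := by
  intro d
  induction d with
  | nil => intro c m _; cases c <;> simp [pvCollect, pvSelect, pvZip3]
  | cons t ts ih =>
    intro c m hcond
    have hcond' : ∀ k : Nat, k < ts.length → (ts.getD k 0 = maxx ∨ ts.getD k 0 = minx) →
        k < c.tail.length ∧ k < m.tail.length := by
      intro k hk hv
      have := hcond (k + 1) (by simpa using hk) (by simpa using hv)
      cases c <;> cases m <;> simp at this ⊢ <;> omega
    have hshift := pvCollect_shift maxx minx ts 0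
    match c, m with
    | [], m =>
      -- zip/zip3 are empty; the condition forbids t (or anything) being maxx/minx at any index
      have hempty1 : (pvCollect maxx minx 0 (t :: ts)).1 = [] := by
        rw [List.eq_nil_iff_forall_not_mem]
        intro x hx
        obtain ⟨k, hk, _, hd⟩ := pvCollect_mem1 maxx minx (t :: ts) 0 x hx
        exact absurd (hcond k hk (Or.inl hd)).1 (by simp)
      have hempty2 : (pvCollect maxx minx 0 (t :: ts)).2 = [] := by
        rw [List.eq_nil_iff_forall_not_mem]
        intro x hx
        obtain ⟨k, hk, _, hd⟩ := pvCollect_mem2 maxx minx (t :: ts) 0 x hx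
        exact absurd (hcond k hk (Or.inr hd)).1 (by simp)
      simp [hempty1, hempty2, pvSelect]
    | a :: c', [] =>
      -- mentors empty: courses_list is empty; the condition forces t ∉ {maxx, minx}
      have ht : ¬ (t = maxx ∨ t = minx) := by
        intro hv
        exact absurd (hcond 0 (by simp) (by simpa using hv)).2 (by simp)
      obtain ⟨ih1, ih2⟩ := ih c' [] hcond'
      have hz3 : pvZip3 (a :: c') [] (t :: ts) = [] := rfl
      have hz3' : pvZip3 c' ([] : List String) ts = [] := by cases c' <;> cases ts <;> rfl
      rw [hz3' ] at ih1 ih2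
      constructor
      · simp only [pvCollect, hshift, hz3,
          List.zip_cons_cons, pvSelect, if_neg (fun h => ht (Or.inl h)), if_neg (fun h => ht (Or.inr h))]
        rw [List.map_map]
        rw [show (pvTitle [] ∘ (· + 1)) = pvTitle ([] : List (String × String × Int)) from ?_]
        · exact ih1
        · funext x; simp [pvTitle, PySem.List.pyGet?]
      · simp only [pvCollect, hshift, hz3,
          List.zip_cons_cons, pvSelect, if_neg (fun h => ht (Or.inl h)), if_neg (fun h => ht (Or.inr h))]
        rw [List.map_map]
        rw [show (pvTitle [] ∘ (· + 1)) = pvTitle ([] : List (String × String × Int)) from ?_]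
        · exact ih2
        · funext x; simp [pvTitle, PySem.List.pyGet?]
    | a :: c', b :: m' =>
      obtain ⟨ih1, ih2⟩ := ih c' m' hcond'
      have hz3 : pvZip3 (a :: c') (b :: m') (t :: ts) = (a, b, t) :: pvZip3 c' m' ts := rfl
      have hmapshift : ∀ (ids : List Int), (∀ x ∈ ids, 0 ≤ x) →
          (ids.map (· + 1)).map (pvTitle ((a, b, t) :: pvZip3 c' m' ts)) = ids.map (pvTitle (pvZip3 c' m' ts)) := by
        intro ids hnn
        rw [List.map_map]
        exact List.map_congr_left (fun x hx => pvTitle_cons (a, b, t) _ x (hnn x hx))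
      have hnn1 : ∀ x ∈ (pvCollect maxx minx 0 ts).1, 0 ≤ x := by
        intro x hx; obtain ⟨k, _, hx', _⟩ := pvCollect_mem1 maxx minx ts 0 x hx; omega
      have hnn2 : ∀ x ∈ (pvCollect maxx minx 0 ts).2, 0 ≤ x := by
        intro x hx; obtain ⟨k, _, hx', _⟩ := pvCollect_mem2 maxx minx ts 0 x hx; omega
      by_cases h1 : t = maxx
      · constructor
        · simp only [pvCollect, hshift, hz3, List.zip_cons_cons, pvSelect, if_pos h1,
            List.map_cons]
          rw [hmapshift _ hnn1, ih1]
          congr 1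
          simp [pvTitle]
        · simp only [pvCollect, hshift, hz3, List.zip_cons_cons, pvSelect, if_pos h1]
          rw [hmapshift _ hnn2, ih2]
      · by_cases h2 : t = minx
        · constructor
          · simp only [pvCollect, hshift, hz3, List.zip_cons_cons, pvSelect,
              if_neg h1, if_pos h2]
            rw [hmapshift _ hnn1, ih1]
          · simp only [pvCollect, hshift, hz3, List.zip_cons_cons, pvSelect,
              if_neg h1, if_pos h2, List.map_cons]
            rw [hmapshift _ hnn2, ih2]
            congr 1
            simp [pvTitle]
        · constructor
          · simp only [pvCollect, hshift, hz3, List.zip_cons_cons, pvSelect,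
              if_neg h1, if_neg h2]
            rw [hmapshift _ hnn1, ih1]
          · simp only [pvCollect, hshift, hz3, List.zip_cons_cons, pvSelect,
              if_neg h1, if_neg h2]
            rw [hmapshift _ hnn2, ih2]

-- ===== VERDICT (by name: the statement is the Claim_ definition above) =====
set_option maxRecDepth 8192 in
theorem minmax_function_spec : Claim_equal_minmax_function := by
  intro courses mentors durations _ hpre
  obtain ⟨hne, hbound⟩ := hpre
  unfold Spec_minmax_function minmax_function minmax_function_alt
  -- name the actual extrema
  obtain ⟨minx, hmin⟩ : ∃ v, PySem.List.min? durations (fun x => x) = some v := by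
    cases h : PySem.List.min? durations (fun x => x) with
    | none => exact absurd ((PySem.List.min?_eq_none_iff durations (fun x => x)).mp h) hne
    | some v => exact ⟨v, rfl⟩
  obtain ⟨maxx, hmax⟩ : ∃ v, PySem.List.max? durations (fun x => x) = some v := by
    cases h : PySem.List.max? durations (fun x => x) with
    | none => exact absurd ((PySem.List.max?_eq_none_iff durations (fun x => x)).mp h) hne
    | some v => exact ⟨v, rfl⟩
  have hcond : ∀ k : Nat, k < durations.length →
      (durations.getD k 0 = maxx ∨ durations.getD k 0 = minx) →
      k < courses.length ∧ k < mentors.length := by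
    intro k hk hv
    apply hbound k hk
    rcases hv with hv | hv
    · left
      intro j hj
      have hmem : durations.getD j 0 ∈ durations := by
        rw [List.getD_eq_getElem _ _ hj]; exact List.getElem_mem hj
      have := PySem.List.max?_isMax hmax _ hmem
      rw [hv]; simpa using this
    · right
      intro j hj
      have hmem : durations.getD j 0 ∈ durations := by
        rw [List.getD_eq_getElem _ _ hj]; exact List.getElem_mem hj
      have := PySem.List.min?_isMin hmin _ hmem
      rw [hv]; simpa using this
  obtain ⟨h1, h2⟩ := pv_main maxx minx durations courses mentors hcond
  simp only [hmin, hmax, Option.getD_some, h1, h2]
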